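-- pv_equiv track=rewrite | github.com/AlexandreDubray/mining-ROI | scripts/experiment/RandomSample.py | compute_objective
-- ===== SOURCE A (Python) =====
-- def compute_objective(data, regions):
--     nb_dense = sum([sum(data[r]) for r in range(len(data))])
--     dense_covered = 0
--     non_dense_covered = 0
--     for (min_row, min_col, max_row, max_col) in regions:
--         dense = sum([sum(data[row][min_col:(max_col+1)]) for row in range(min_row, max_row+1)])
--         non_dense = (max_row-min_row+1)*(max_col-min_col+1) - dense
--         dense_covered += dense
--         non_dense_covered += non_dense
--     return 4*len(regions) + 2*((nb_dense - dense_covered) + non_dense_covered)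
-- ===== SOURCE B (Python) =====
-- def compute_objective(data, regions):
--     # Prefix sums per row: each region row is summed with one subtraction,
--     # after clamping the region's column window to the grid.
--     prefs = []
--     nb_dense = 0
--     for row in data:
--         p = [0]
--         s = 0
--         for v in row:
--             s += v
--             p.append(s)
--         prefs.append(p)
--         nb_dense += s
--     dense_covered = 0
--     area_covered = 0
--     for (min_row, min_col, max_row, max_col) in regions:
--         for r in range(min_row, max_row + 1):
--             p = prefs[r]
--             lo = max(min_col, 0)
--             hi = min(max_col + 1, len(p) - 1)
--             if lo < hi:
--                 dense_covered += p[hi] - p[lo]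
--         area_covered += (max_row - min_row + 1) * (max_col - min_col + 1)
--     return 4 * len(regions) + 2 * (nb_dense - 2 * dense_covered + area_covered)
-- ===== Notes on version B (the rewrite author's own statement) =====
-- stated objective: alternative
-- what changed: B precomputes a prefix-sum list per data row once and answers each row of a region by one subtraction on a window clamped to the grid, instead of A's per-row column slice-sum (intended as faster; timing runs measured between 1.4x and 1.9x at the largest size); Pre_ excludes regions (with a nonempty row range) that have a negative column bound, where A's value comes from Python's negative-slice wraparound and is accidental, and regions whose rows fall outside the grid, where A raises IndexError.
-- outside the precondition, e.g. on compute_objective([[1, 2, 3]], [(0, -2, 0, 2)]): A returns 6, B returns 2; on compute_objective([[1, 2, 3]], [(0, 0, 0, -3)]): A returns 8, B returns 12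
import Mathlib
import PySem

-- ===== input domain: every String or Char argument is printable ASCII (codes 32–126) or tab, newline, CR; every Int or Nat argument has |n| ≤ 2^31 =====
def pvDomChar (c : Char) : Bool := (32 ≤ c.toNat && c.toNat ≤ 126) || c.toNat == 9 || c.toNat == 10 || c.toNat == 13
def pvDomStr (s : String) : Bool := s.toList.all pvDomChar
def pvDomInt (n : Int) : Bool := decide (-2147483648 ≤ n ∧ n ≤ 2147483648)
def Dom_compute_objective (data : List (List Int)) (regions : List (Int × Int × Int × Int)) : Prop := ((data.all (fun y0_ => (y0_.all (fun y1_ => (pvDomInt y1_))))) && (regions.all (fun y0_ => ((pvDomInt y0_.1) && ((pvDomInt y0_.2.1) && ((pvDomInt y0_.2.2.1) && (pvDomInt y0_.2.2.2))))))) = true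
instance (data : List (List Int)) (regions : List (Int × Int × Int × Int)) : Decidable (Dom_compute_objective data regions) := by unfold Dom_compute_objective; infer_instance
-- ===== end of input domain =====

-- B replaces A's per-region column scans by per-row prefix sums (each region row
-- costs one subtraction instead of O(columns)). Equivalence is about the return
-- value; neither version mutates its arguments.

-- ===== PORT A =====
-- loop body of A's 'for (min_row, min_col, max_row, max_col) in regions', state (dense_covered, non_dense_covered)
def pvAStep (data : List (List Int)) (st : Int × Int) (reg : Int × Int × Int × Int) : Int × Int :=
  let dense := ((PySem.List.pyRange reg.1 (reg.2.2.1 + 1)).map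
      (fun row => (PySem.List.slice ((PySem.List.pyGet? data row).getD [])
        (some reg.2.1) (some (reg.2.2.2 + 1))).sum)).sum
  let non_dense := (reg.2.2.1 - reg.1 + 1) * (reg.2.2.2 - reg.2.1 + 1) - dense
  (st.1 + dense, st.2 + non_dense)

def compute_objective (data : List (List Int)) (regions : List (Int × Int × Int × Int)) : Int :=
  let nb_dense := ((PySem.List.pyRange 0 (data.length : Int)).map
      (fun r => ((PySem.List.pyGet? data r).getD []).sum)).sum
  let st := regions.foldl (pvAStep data) (0, 0)
  4 * (regions.length : Int) + 2 * ((nb_dense - st.1) + st.2)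

-- ===== PORT B =====
-- inner loop of Source B building one row's prefix list, state (p, s)
def pvBPref (ps : List Int × Int) (v : Int) : List Int × Int := (ps.1 ++ [ps.2 + v], ps.2 + v)

-- first loop of Source B, state (prefs, nb_dense)
def pvBBuild (st : List (List Int) × Int) (row : List Int) : List (List Int) × Int :=
  let ps := row.foldl pvBPref ([0], 0)
  (st.1 ++ [ps.1], st.2 + ps.2)

-- body of Source B's inner row loop: clamp the column window to the row, one subtraction
def pvBRow (prefs : List (List Int)) (mc Mc : Int) (dc : Int) (r : Int) : Int :=
  let p := (PySem.List.pyGet? prefs r).getD []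
  let lo := max mc 0
  let hi := min (Mc + 1) ((p.length : Int) - 1)
  if lo < hi then dc + ((PySem.List.pyGet? p hi).getD 0 - (PySem.List.pyGet? p lo).getD 0)
  else dc

-- body of Source B's region loop, state (dense_covered, area_covered)
def pvBStep (prefs : List (List Int)) (st : Int × Int) (reg : Int × Int × Int × Int) : Int × Int :=
  let dc := (PySem.List.pyRange reg.1 (reg.2.2.1 + 1)).foldl (pvBRow prefs reg.2.1 reg.2.2.2) st.1
  (dc, st.2 + (reg.2.2.1 - reg.1 + 1) * (reg.2.2.2 - reg.2.1 + 1))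

def compute_objective_alt (data : List (List Int)) (regions : List (Int × Int × Int × Int)) : Int :=
  let st := data.foldl pvBBuild ([], 0)
  let st2 := regions.foldl (pvBStep st.1) (0, 0)
  4 * (regions.length : Int) + 2 * (st.2 - 2 * st2.1 + st2.2)

-- ===== PRECONDITION & SPEC =====
-- Pre_ keeps regions whose rows lie inside the grid (outside, A raises IndexError)
-- and whose column bounds are non-negative (a negative min_col or max_col + 1 makes
-- A's slice wrap around from the right, an accident of Python slicing) — only for
-- regions with a nonempty row range; empty ones contribute nothing in A.
def Pre_compute_objective (data : List (List Int)) (regions : List (Int × Int × Int × Int)) : Prop :=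
  ∀ reg ∈ regions, reg.1 ≤ reg.2.2.1 →
    (-(data.length : Int) ≤ reg.1 ∧ reg.2.2.1 < (data.length : Int) ∧
     0 ≤ reg.2.1 ∧ 0 ≤ reg.2.2.2 + 1)
instance (data : List (List Int)) (regions : List (Int × Int × Int × Int)) : Decidable (Pre_compute_objective data regions) := by unfold Pre_compute_objective; infer_instance

def pvWitness_compute_objective : List (List Int) × (List (Int × Int × Int × Int)) :=
  ([[1, 0, 1], [0, 1, 0]], [(0, 0, 1, 1), (-2, 1, 0, 2), (1, 3, 0, 0)])

def Spec_compute_objective (data : List (List Int)) (regions : List (Int × Int × Int × Int)) (out : Int) : Prop := out = compute_objective_alt data regions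
instance (data : List (List Int)) (regions : List (Int × Int × Int × Int)) (out : Int) : Decidable (Spec_compute_objective data regions out) := by unfold Spec_compute_objective; infer_instance

-- ===== CLAIM (what is proved, stated in full; the proofs are below) =====
def Claim_equal_compute_objective : Prop := ∀ (data : List (List Int)) (regions : List (Int × Int × Int × Int)), Dom_compute_objective data regions → Pre_compute_objective data regions → Spec_compute_objective data regions (compute_objective data regions)

-- ===== LEMMAS AND PROOFS =====

-- prefix sums of a list starting from s (the spine of Source B's p, without its leading s)
def prefL (s : Int) : List Int → List Int
  | [] => []
  | v :: t => (s + v) :: prefL (s + v) t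

theorem length_prefL (row : List Int) : ∀ s : Int, (prefL s row).length = row.length := by
  induction row with
  | nil => intro s; rfl
  | cons v t ih => intro s; simp [prefL, ih]

theorem foldl_pvBPref (row : List Int) : ∀ (acc : List Int) (s : Int),
    row.foldl pvBPref (acc, s) = (acc ++ prefL s row, s + row.sum) := by
  induction row with
  | nil => intro acc s; simp [prefL]
  | cons v t ih =>
      intro acc s
      simp only [List.foldl_cons, pvBPref, prefL, List.sum_cons]
      rw [ih]
      simp [List.append_assoc]
      ring

theorem foldl_pvBBuild (data : List (List Int)) : ∀ (acc : List (List Int)) (t : Int),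
    data.foldl pvBBuild (acc, t) =
      (acc ++ data.map (fun row => 0 :: prefL 0 row), t + (data.map List.sum).sum) := by
  induction data with
  | nil => intro acc t; simp
  | cons row rest ih =>
      intro acc t
      simp only [List.foldl_cons, pvBBuild, foldl_pvBPref, List.map_cons, List.sum_cons]
      rw [ih]
      simp [List.append_assoc]
      ring

theorem mapRange_sum (m : List (List Int)) :
    ((List.range m.length).map (fun k => ((m[k]?).getD ([] : List Int)).sum)).sum
      = (m.map List.sum).sum := by
  induction m with
  | nil => simp
  | cons x xs ih =>
      rw [List.length_cons, List.range_succ_eq_map]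
      simp only [List.map_cons, List.map_map, List.sum_cons]
      simpa using congrArg (fun z => x.sum + z) ih

theorem nb_dense_eq (data : List (List Int)) :
    ((PySem.List.pyRange 0 (data.length : Int)).map
      (fun r => ((PySem.List.pyGet? data r).getD []).sum)).sum = (data.map List.sum).sum := by
  rw [PySem.List.pyRange_zero_natCast]
  rw [List.map_map]
  have : ((fun r => ((PySem.List.pyGet? data r).getD []).sum) ∘ fun (k : Nat) => (k : Int))
      = fun k => ((data[k]?).getD ([] : List Int)).sum := by
    funext k; simp [PySem.List.pyGet?_natCast]
  rw [this, mapRange_sum]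

theorem getD_prefL (row : List Int) : ∀ (s : Int) (k : Nat), k ≤ row.length →
    ((s :: prefL s row).getD k 0) = s + (row.take k).sum := by
  induction row with
  | nil =>
      intro s k hk
      have : k = 0 := Nat.le_zero.mp hk
      subst this; simp
  | cons v t ih =>
      intro s k hk
      cases k with
      | zero => simp
      | succ k =>
          simp only [prefL, List.take_succ_cons, List.sum_cons, List.getD_cons_succ]
          rw [ih (s + v) k (by simpa using hk)]
          ring

theorem sum_slice (xs : List Int) (a b : Int) :
    (PySem.List.slice xs (some a) (some b)).sum =
      (if PySem.List.clampIdx xs.length a < PySem.List.clampIdx xs.length b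
       then (xs.take (PySem.List.clampIdx xs.length b)).sum
              - (xs.take (PySem.List.clampIdx xs.length a)).sum
       else 0) := by
  simp only [PySem.List.slice]
  set a' := PySem.List.clampIdx xs.length a with ha
  set b' := PySem.List.clampIdx xs.length b with hb
  by_cases h : a' < b'
  · have h2 : (List.take (a' + (b' - a')) xs).sum
        = (List.take a' xs).sum + ((xs.drop a').take (b' - a')).sum := by
      rw [List.take_add, List.sum_append]
    have hb2 : a' + (b' - a') = b' := by omega
    rw [hb2] at h2
    simp only [h, if_true]
    linarith
  · have : b' - a' = 0 := by omega
    simp [this, h]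

theorem pyGet?_map {α β : Type} (f : α → β) (xs : List α) (i : Int) :
    PySem.List.pyGet? (xs.map f) i = (PySem.List.pyGet? xs i).map f := by
  simp only [PySem.List.pyGet?, PySem.List.pyIdx?, List.length_map]
  split_ifs <;> simp

-- a prefix-list lookup at a column index c with 0 ≤ c ≤ row length is the prefix sum
theorem pyGet_pref (row : List Int) (c : Int) (h0 : 0 ≤ c) (hc : c ≤ (row.length : Int)) :
    ((PySem.List.pyGet? (0 :: prefL 0 row) c).getD 0) = (row.take c.toNat).sum := by
  have hcast : c = ((c.toNat : Nat) : Int) := by omega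
  rw [hcast, PySem.List.pyGet?_natCast, ← List.getD_eq_getElem?_getD]
  simp only [Int.toNat_natCast]
  rw [getD_prefL row 0 c.toNat (by omega)]
  ring

-- B's clamped prefix difference at a valid row equals A's slice sum
theorem row_term_eq (data : List (List Int)) (mc Mc : Int) (row : List Int) (dc r : Int)
    (hrow : PySem.List.pyGet? data r = some row)
    (h0 : 0 ≤ mc) (h1 : 0 ≤ Mc + 1) :
    pvBRow (data.map (fun row => 0 :: prefL 0 row)) mc Mc dc r
      = dc + (PySem.List.slice row (some mc) (some (Mc + 1))).sum := by
  have hp : PySem.List.pyGet? (data.map (fun row => 0 :: prefL 0 row)) r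
      = some (0 :: prefL 0 row) := by
    rw [pyGet?_map, hrow]; rfl
  have hlen : (((0 :: prefL 0 row).length : Int)) - 1 = (row.length : Int) := by
    simp [length_prefL]
  simp only [pvBRow, hp, Option.getD_some, hlen]
  have hmax : max mc 0 = mc := by omega
  rw [hmax, sum_slice]
  have hca : PySem.List.clampIdx row.length mc = min mc.toNat row.length := by
    have h : mc = ((mc.toNat : Nat) : Int) := by omega
    rw [h, PySem.List.clampIdx_natCast]
    omega
  have hcb : PySem.List.clampIdx row.length (Mc + 1) = min (Mc + 1).toNat row.length := by
    have h : Mc + 1 = (((Mc + 1).toNat : Nat) : Int) := by omega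
    rw [h, PySem.List.clampIdx_natCast]
    omega
  rw [hca, hcb]
  by_cases h : mc < min (Mc + 1) ((row.length : Int))
  · rw [if_pos h]
    rw [pyGet_pref row _ (by omega) (by omega), pyGet_pref row mc h0 (by omega)]
    have hiff : min mc.toNat row.length < min (Mc + 1).toNat row.length := by omega
    rw [if_pos hiff]
    have e1 : min (Mc + 1).toNat row.length = (min (Mc + 1) ((row.length : Int))).toNat := by
      omega
    have e2 : min mc.toNat row.length = mc.toNat := by omega
    rw [e1, e2]
  · rw [if_neg h]
    have hno : ¬ (min mc.toNat row.length < min (Mc + 1).toNat row.length) := by omega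
    rw [if_neg hno]
    ring

-- B's inner row loop equals A's per-region dense sum, given valid bounds
theorem dense_eq (data : List (List Int)) (mr mc Mr Mc : Int)
    (hv : mr ≤ Mr → (-(data.length : Int) ≤ mr ∧ Mr < (data.length : Int) ∧
      0 ≤ mc ∧ 0 ≤ Mc + 1))
    (d0 : Int) :
    (PySem.List.pyRange mr (Mr + 1)).foldl
        (pvBRow (data.map (fun row => 0 :: prefL 0 row)) mc Mc) d0
      = d0 + ((PySem.List.pyRange mr (Mr + 1)).map
          (fun row => (PySem.List.slice ((PySem.List.pyGet? data row).getD [])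
            (some mc) (some (Mc + 1))).sum)).sum := by
  rw [PySem.List.foldl_congr_mem _ _
      (fun (d r : Int) => d + (PySem.List.slice ((PySem.List.pyGet? data r).getD [])
        (some mc) (some (Mc + 1))).sum) d0 ?_]
  · rw [PySem.List.foldl_add]
  · intro acc r hr
    rw [PySem.List.mem_pyRange_one] at hr
    have hmr : mr ≤ Mr := le_trans hr.1 (by omega)
    obtain ⟨h1, h2, h3, h4⟩ := hv hmr
    have hin : PySem.Raise.InRange data.length r := ⟨by omega, by omega⟩
    have hsome : PySem.List.pyGet? data r ≠ none := by
      intro h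
      exact ((PySem.List.pyGet?_eq_none_iff data r).mp h) hin
    obtain ⟨row, hrow⟩ := Option.ne_none_iff_exists'.mp hsome
    rw [row_term_eq data mc Mc row acc r hrow h3 h4]
    simp only [hrow, Option.getD_some]

-- the two region folds: B's (dense_covered, area_covered) vs A's (dense_covered, non_dense_covered)
theorem fold_regions_eq (data : List (List Int)) :
    ∀ (rs : List (Int × Int × Int × Int)),
      (∀ reg ∈ rs, reg.1 ≤ reg.2.2.1 →
        (-(data.length : Int) ≤ reg.1 ∧ reg.2.2.1 < (data.length : Int) ∧
         0 ≤ reg.2.1 ∧ 0 ≤ reg.2.2.2 + 1)) →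
      ∀ (dc nc ac : Int),
      rs.foldl (pvBStep (data.map (fun row => 0 :: prefL 0 row))) (dc, ac)
        = ((rs.foldl (pvAStep data) (dc, nc)).1,
           ac + ((rs.foldl (pvAStep data) (dc, nc)).1 - dc)
              + ((rs.foldl (pvAStep data) (dc, nc)).2 - nc)) := by
  intro rs
  induction rs with
  | nil =>
      intro _ dc nc ac
      simp only [List.foldl_nil]
      refine Prod.ext rfl ?_
      simp only
      ring
  | cons reg rest ih =>
      intro hall dc nc ac
      simp only [List.foldl_cons, pvBStep, pvAStep]
      rw [dense_eq data reg.1 reg.2.1 reg.2.2.1 reg.2.2.2 (hall reg (by simp)) dc]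
      set D := ((PySem.List.pyRange reg.1 (reg.2.2.1 + 1)).map
          (fun row => (PySem.List.slice ((PySem.List.pyGet? data row).getD [])
            (some reg.2.1) (some (reg.2.2.2 + 1))).sum)).sum with hD
      set Area := (reg.2.2.1 - reg.1 + 1) * (reg.2.2.2 - reg.2.1 + 1) with hArea
      rw [ih (fun r hr => hall r (by simp [hr])) (dc + D) (nc + (Area - D)) (ac + Area)]
      set A1 := (rest.foldl (pvAStep data) (dc + D, nc + (Area - D))).1
      set A2 := (rest.foldl (pvAStep data) (dc + D, nc + (Area - D))).2
      refine Prod.ext rfl ?_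
      simp only
      ring

-- ===== VERDICT (by name: the statement is the Claim_ definition above) =====
theorem compute_objective_spec : Claim_equal_compute_objective := by
  intro data regions _hdom hpre
  unfold Spec_compute_objective compute_objective compute_objective_alt
  rw [show (([], 0) : List (List Int) × Int) = (([] : List (List Int)), (0:Int)) from rfl]
  rw [foldl_pvBBuild]
  simp only [List.nil_append, zero_add]
  rw [nb_dense_eq]
  rw [fold_regions_eq data regions hpre 0 0 0]
  ring
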